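-- pv_equiv track=rewrite | github.com/love-adela/algorithm-ps | acmicpc/11726/11726.py | fibo_matrix
-- ===== SOURCE A (Python) =====
-- def multiply_matrix(a, b):
--     MOD = 10007
--     return (
--         (a[0]*b[0]+a[1]*b[2])%MOD,
--         (a[0]*b[1]+a[1]*b[3])%MOD,
--         (a[2]*b[0]+a[3]*b[2])%MOD,
--         (a[2]*b[1]+a[3]*b[3])%MOD,)
--
-- def fibo_matrix(n):
--     if n == 0: return (1, 0, 0, 1)
--     if n == 1: return (1, 1, 1, 0)
--     a = fibo_matrix(n//2)
--     a_square = multiply_matrix(a,a)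
--     if n %2==0:
--         return a_square
--     else:
--         return multiply_matrix(a_square, (1, 1, 1, 0))
-- ===== SOURCE B (Python) =====
-- def multiply_matrix(a, b):
--     MOD = 10007
--     return (
--         (a[0]*b[0]+a[1]*b[2])%MOD,
--         (a[0]*b[1]+a[1]*b[3])%MOD,
--         (a[2]*b[0]+a[3]*b[2])%MOD,
--         (a[2]*b[1]+a[3]*b[3])%MOD,)
--
-- def fibo_matrix(n):
--     result = (1, 0, 0, 1)
--     base = (1, 1, 1, 0)
--     while n > 0:
--         if n % 2 == 1:
--             result = multiply_matrix(result, base)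
--         base = multiply_matrix(base, base)
--         n //= 2
--     return result
-- ===== Notes on version B (the rewrite author's own statement) =====
-- stated objective: alternative
-- what changed: Replaces the top-down recursive halving (compute fibo_matrix(n//2), square, maybe multiply by M) with a bottom-up iterative square-and-multiply loop over the bits of n, accumulating the result in a register.
import Mathlib
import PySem

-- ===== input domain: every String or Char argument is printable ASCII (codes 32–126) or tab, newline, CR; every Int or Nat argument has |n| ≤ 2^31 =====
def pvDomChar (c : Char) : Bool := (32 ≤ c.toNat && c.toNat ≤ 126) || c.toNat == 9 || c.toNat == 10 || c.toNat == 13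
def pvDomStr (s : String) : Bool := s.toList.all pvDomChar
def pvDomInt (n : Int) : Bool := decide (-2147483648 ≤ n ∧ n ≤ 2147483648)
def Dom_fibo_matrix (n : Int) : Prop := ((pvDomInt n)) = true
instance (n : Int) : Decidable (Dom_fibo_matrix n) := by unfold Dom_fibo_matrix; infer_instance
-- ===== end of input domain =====

-- B replaces A's top-down recursive halving with an iterative square-and-multiply
-- loop over the bits of n (same multiply_matrix helper); equivalence proved for n ≥ 0.

-- ===== PORT A =====
-- multiply_matrix, shared helper of A and B (B's Python keeps it verbatim)
def multiply_matrix (a b : Int × Int × Int × Int) : Int × Int × Int × Int :=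
  (PySem.Int.mod (a.1*b.1 + a.2.1*b.2.2.1) 10007,
   PySem.Int.mod (a.1*b.2.1 + a.2.1*b.2.2.2) 10007,
   PySem.Int.mod (a.2.2.1*b.1 + a.2.2.2*b.2.2.1) 10007,
   PySem.Int.mod (a.2.2.1*b.2.1 + a.2.2.2*b.2.2.2) 10007)

-- A's recursion, on n.toNat (A diverges for n < 0, excluded by Pre_; for n ≥ 0 the
-- Nat recursion with k/2 is exactly Python's n//2)
def fiboRecAux : Nat → Int × Int × Int × Int
  | 0 => (1, 0, 0, 1)
  | 1 => (1, 1, 1, 0)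
  | (k+2) =>
      let a := fiboRecAux ((k+2)/2)
      let a_square := multiply_matrix a a
      if (k+2) % 2 == 0 then a_square else multiply_matrix a_square (1, 1, 1, 0)

def fibo_matrix (n : Int) : Int × Int × Int × Int := fiboRecAux n.toNat

-- ===== PORT B =====
-- the while-loop: while n > 0: (odd → result *= base); base *= base; n //= 2.
-- n.toNat is exact: for n ≤ 0 the Python loop runs zero times.
def fibLoop (result base : Int × Int × Int × Int) (k : Nat) : Int × Int × Int × Int :=
  if h : k = 0 then result
  else
    fibLoop (if k % 2 == 1 then multiply_matrix result base else result)
      (multiply_matrix base base) (k / 2)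
  termination_by k
  decreasing_by exact Nat.div_lt_self (Nat.pos_of_ne_zero h) (by omega)

def fibo_matrix_alt (n : Int) : Int × Int × Int × Int :=
  fibLoop (1, 0, 0, 1) (1, 1, 1, 0) n.toNat

-- ===== PRECONDITION & SPEC =====
-- Pre_ excludes n < 0, on which A recurses forever (RecursionError); A returns on all n ≥ 0.
def Pre_fibo_matrix (n : Int) : Prop := 0 ≤ n
instance (n : Int) : Decidable (Pre_fibo_matrix n) := by unfold Pre_fibo_matrix; infer_instance
def pvWitness_fibo_matrix : Int := 10

def Spec_fibo_matrix (n : Int) (out : Int × Int × Int × Int) : Prop := out = fibo_matrix_alt n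
instance (n : Int) (out : Int × Int × Int × Int) : Decidable (Spec_fibo_matrix n out) := by unfold Spec_fibo_matrix; infer_instance

-- ===== CLAIM (what is proved, stated in full; the proofs are below) =====
def Claim_equal_fibo_matrix : Prop := ∀ (n : Int), Dom_fibo_matrix n → Pre_fibo_matrix n → Spec_fibo_matrix n (fibo_matrix n)

-- ===== LEMMAS AND PROOFS =====

-- pw1 b k = b^(k+1) under multiply_matrix, the common reference value
def pw1 (b : Int × Int × Int × Int) : Nat → Int × Int × Int × Int
  | 0 => b
  | k+1 => multiply_matrix b (pw1 b k)

theorem pymod_pos (a : Int) : PySem.Int.mod a 10007 = a % 10007 :=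
  PySem.Int.mod_eq_emod_of_pos (by norm_num)

theorem modmulL (x y z w : Int) :
    (x % 10007 * z + y % 10007 * w) % 10007 = (x * z + y * w) % 10007 := by
  conv_rhs => rw [Int.add_emod, Int.mul_emod x z, Int.mul_emod y w]
  rw [Int.add_emod, Int.mul_emod (x % 10007) z, Int.mul_emod (y % 10007) w,
    Int.emod_emod_of_dvd _ dvd_rfl, Int.emod_emod_of_dvd _ dvd_rfl]

theorem modmulR (x y z w : Int) :
    (x * (z % 10007) + y * (w % 10007)) % 10007 = (x * z + y * w) % 10007 := by
  conv_rhs => rw [Int.add_emod, Int.mul_emod x z, Int.mul_emod y w]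
  rw [Int.add_emod, Int.mul_emod x (z % 10007), Int.mul_emod y (w % 10007),
    Int.emod_emod_of_dvd _ dvd_rfl, Int.emod_emod_of_dvd _ dvd_rfl]

theorem mul_assoc_mat (a b c : Int × Int × Int × Int) :
    multiply_matrix (multiply_matrix a b) c = multiply_matrix a (multiply_matrix b c) := by
  obtain ⟨a0, a1, a2, a3⟩ := a
  obtain ⟨b0, b1, b2, b3⟩ := b
  obtain ⟨c0, c1, c2, c3⟩ := c
  simp only [multiply_matrix, pymod_pos, modmulL, modmulR, Prod.mk.injEq]
  refine ⟨?_, ?_, ?_, ?_⟩ <;> ring_nf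

theorem pw1_succ (b : Int × Int × Int × Int) (k : Nat) :
    pw1 b (k + 1) = multiply_matrix b (pw1 b k) := rfl

theorem pw1_mul (b : Int × Int × Int × Int) (i j : Nat) :
    multiply_matrix (pw1 b i) (pw1 b j) = pw1 b (i + j + 1) := by
  induction i with
  | zero =>
      have h : 0 + j + 1 = j + 1 := by omega
      rw [h, pw1_succ]
      rfl
  | succ i ih =>
      have h : i + 1 + j + 1 = (i + j + 1) + 1 := by omega
      rw [h, pw1_succ, pw1_succ, mul_assoc_mat, ih]

theorem pw1_mul_base (b : Int × Int × Int × Int) (i : Nat) :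
    multiply_matrix (pw1 b i) b = pw1 b (i + 1) := by
  have h := pw1_mul b i 0
  simpa using h

theorem pw1_sq (b : Int × Int × Int × Int) (j : Nat) :
    pw1 (multiply_matrix b b) j = pw1 b (2 * j + 1) := by
  induction j with
  | zero => rfl
  | succ j ih =>
      rw [pw1_succ, ih]
      have h1 : multiply_matrix b b = pw1 b 1 := rfl
      rw [h1, pw1_mul]
      congr 1
      omega

-- entries of any multiply_matrix output are already reduced mod 10007
theorem emod_mul_mat (a b : Int × Int × Int × Int) :
    (fun p : Int × Int × Int × Int =>
      (p.1 % 10007, p.2.1 % 10007, p.2.2.1 % 10007, p.2.2.2 % 10007))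
      (multiply_matrix a b) = multiply_matrix a b := by
  simp only [multiply_matrix, pymod_pos]
  simp [Int.emod_emod_of_dvd _ dvd_rfl]

theorem id_mul (x : Int × Int × Int × Int) :
    multiply_matrix (1, 0, 0, 1) x =
      (x.1 % 10007, x.2.1 % 10007, x.2.2.1 % 10007, x.2.2.2 % 10007) := by
  obtain ⟨x0, x1, x2, x3⟩ := x
  simp [multiply_matrix]

theorem id_mul_pw1M (k : Nat) :
    multiply_matrix (1, 0, 0, 1) (pw1 (1, 1, 1, 0) k) = pw1 (1, 1, 1, 0) k := by
  rw [id_mul]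
  cases k with
  | zero => decide
  | succ k => exact emod_mul_mat _ _

-- A's recursion computes M^(k+1)
theorem fiboRecAux_eq_pw1 (k : Nat) : fiboRecAux (k + 1) = pw1 (1, 1, 1, 0) k := by
  induction k using Nat.strong_induction_on with
  | _ k ih =>
      match k with
      | 0 => simp [fiboRecAux, pw1]
      | k + 1 =>
          rw [show k + 1 + 1 = k + 2 from rfl, fiboRecAux]
          have hhalf : (k + 2) / 2 = k / 2 + 1 := by omega
          have ihh := ih (k / 2) (by omega)
          simp only [hhalf, ihh]
          rw [pw1_mul]
          by_cases hpar : (k + 2) % 2 = 0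
          · have hb : ((k + 2) % 2 == 0) = true := by simp only [beq_iff_eq]; exact hpar
            rw [hb, if_pos rfl]
            congr 1
            omega
          · have hb : ((k + 2) % 2 == 0) = false := by
              simp only [beq_eq_false_iff_ne, ne_eq]; exact hpar
            rw [hb]
            simp only [Bool.false_eq_true, if_false]
            rw [pw1_mul_base]
            congr 1
            omega

-- B's loop invariant
theorem fibLoop_eq (k : Nat) : ∀ r b, fibLoop r b (k + 1) = multiply_matrix r (pw1 b k) := by
  induction k using Nat.strong_induction_on with
  | _ k ih =>
      intro r b
      rw [fibLoop]
      simp only [Nat.succ_ne_zero, dite_false]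
      match k with
      | 0 => norm_num; rw [fibLoop]; rfl
      | k' + 1 =>
          have hhalf : (k' + 2) / 2 = k' / 2 + 1 := by omega
          rw [hhalf, ih (k' / 2) (by omega), pw1_sq]
          by_cases hpar : (k' + 2) % 2 = 1
          · have hb : ((k' + 2) % 2 == 1) = true := by simp only [beq_iff_eq]; exact hpar
            rw [hb, if_pos rfl, mul_assoc_mat]
            have h1 : multiply_matrix b b = pw1 b 1 := rfl
            conv_lhs => rw [show multiply_matrix b (pw1 b (2 * (k' / 2) + 1))
              = pw1 b (2 * (k' / 2) + 2) from rfl]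
            have he : 2 * (k' / 2) + 2 = k' + 1 := by omega
            rw [he]
          · have hb : ((k' + 2) % 2 == 1) = false := by
              simp only [beq_eq_false_iff_ne, ne_eq]; exact hpar
            rw [hb]
            simp only [Bool.false_eq_true, if_false]
            have he : 2 * (k' / 2) + 1 = k' + 1 := by omega
            rw [he]

theorem main_eq (k : Nat) : fiboRecAux k = fibLoop (1, 0, 0, 1) (1, 1, 1, 0) k := by
  cases k with
  | zero => rw [fibLoop]; simp [fiboRecAux]
  | succ k => rw [fiboRecAux_eq_pw1, fibLoop_eq, id_mul_pw1M]

-- ===== VERDICT (by name: the statement is the Claim_ definition above) =====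
theorem fibo_matrix_spec : Claim_equal_fibo_matrix := by
  intro n _ _
  show fibo_matrix n = fibo_matrix_alt n
  exact main_eq n.toNat
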